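-- pv_equiv track=rewrite | github.com/utsav0092/DSA | other_Questions/2460_Leet_operationarray.py | oparray
-- ===== SOURCE A (Python) =====
-- def oparray(nums):
--       n = len(nums)
--       # Step 1: Apply the operations
--       for i in range(n - 1):
--         if nums[i] == nums[i + 1]:
--             nums[i] *= 2
--             nums[i + 1] = 0
--       # Step 2: Move zeroes to the end using two-pointer method
--     #   nums = moveZeroes(nums)
--       moveZeroes(nums)
--       return nums
--
-- def moveZeroes(nums):
--     n = len(nums)
--     pos = 0  # Position to place the next non-zero element
--     for i in range(n):
--         if nums[i] != 0:
--             nums[pos], nums[i] = nums[i], nums[pos]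
--             pos += 1
-- ===== SOURCE B (Python) =====
-- def oparray(nums):
--     # Single carry-based pass for the doubling step, then filter-and-pad for the zero move.
--     # Mutates nums in place via slice assignment (same observable mutation as A) and returns it.
--     if nums:
--         out = []
--         c = nums[0]
--         for x in nums[1:]:
--             if c == x:
--                 out.append(2 * c)
--                 c = 0
--             else:
--                 out.append(c)
--                 c = x
--         out.append(c)
--         non_zeros = [v for v in out if v != 0]
--         nums[:] = non_zeros + [0] * (len(out) - len(non_zeros))
--     return nums
-- ===== Notes on version B (the rewrite author's own statement) =====
-- stated objective: simpler
-- what changed: A mutates the array by index (adjacent-pair doubling in place, then a swap-based two-pointer moveZeroes); B makes one carry-based pass building a fresh list and then rebuilds it as non-zeros followed by zero padding, no index arithmetic or swaps.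
import Mathlib
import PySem

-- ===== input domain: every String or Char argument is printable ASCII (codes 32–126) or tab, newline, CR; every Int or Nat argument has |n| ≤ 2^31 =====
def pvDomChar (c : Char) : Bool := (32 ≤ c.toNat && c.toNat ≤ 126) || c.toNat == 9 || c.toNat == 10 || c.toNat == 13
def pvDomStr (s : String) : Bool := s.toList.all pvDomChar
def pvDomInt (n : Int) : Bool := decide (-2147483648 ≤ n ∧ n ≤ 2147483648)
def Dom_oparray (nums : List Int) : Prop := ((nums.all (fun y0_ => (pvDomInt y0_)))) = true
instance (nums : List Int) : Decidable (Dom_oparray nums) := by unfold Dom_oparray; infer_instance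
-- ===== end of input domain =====

-- B replaces A's in-place index mutation (adjacent doubling + swap-based two-pointer moveZeroes)
-- with one carry-based pass followed by a filter-and-pad rebuild (objective: simpler).
-- A (and B, via slice assignment) mutate the argument in place; the theorem is about the return value.

-- ===== PORT A =====
-- one iteration of A's step-1 loop: if nums[i] == nums[i+1]: nums[i] *= 2; nums[i+1] = 0
def opStep (a : List Int) (i : Nat) : List Int :=
  if a.getD i 0 == a.getD (i + 1) 0 then (a.set i (2 * a.getD i 0)).set (i + 1) 0 else a

-- one iteration of moveZeroes' loop, state = (nums, pos); RHS of the swap read first, as in Python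
def mzStep (s : List Int × Nat) (i : Nat) : List Int × Nat :=
  if s.1.getD i 0 != 0 then ((s.1.set s.2 (s.1.getD i 0)).set i (s.1.getD s.2 0), s.2 + 1) else s

def moveZeroes (nums : List Int) : List Int :=
  ((List.range nums.length).foldl mzStep (nums, 0)).1

def oparray (nums : List Int) : List Int :=
  moveZeroes ((List.range (nums.length - 1)).foldl opStep nums)

-- ===== PORT B =====
-- carry-based pass: carryPass c xs emits one value per step and appends the final carry
def carryPass : Int → List Int → List Int
  | c, [] => [c]
  | c, x :: xs => if c == x then 2 * c :: carryPass 0 xs else c :: carryPass x xs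

def oparray_alt (nums : List Int) : List Int :=
  match nums with
  | [] => []
  | h :: t =>
    let out := carryPass h t
    let nz := out.filter (fun v => v != 0)
    nz ++ List.replicate (out.length - nz.length) 0

-- ===== PRECONDITION & SPEC =====
def Spec_oparray (nums : List Int) (out : List Int) : Prop := out = oparray_alt nums
instance (nums : List Int) (out : List Int) : Decidable (Spec_oparray nums out) := by unfold Spec_oparray; infer_instance

-- ===== CLAIM (what is proved, stated in full; the proofs are below) =====
def Claim_equal_oparray : Prop := ∀ (nums : List Int), Dom_oparray nums → Spec_oparray nums (oparray nums)

-- ===== LEMMAS AND PROOFS =====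

-- emitted prefix and carry of the carry pass, used to state the step-1 loop invariant
def emit : Int → List Int → List Int × Int
  | c, [] => ([], c)
  | c, x :: xs =>
    if c == x then ((2 * c) :: (emit 0 xs).1, (emit 0 xs).2)
    else (c :: (emit x xs).1, (emit x xs).2)

lemma carryPass_eq_emit (l : List Int) (c : Int) :
    carryPass c l = (emit c l).1 ++ [(emit c l).2] := by
  induction l generalizing c with
  | nil => simp [carryPass, emit]
  | cons x xs ih => by_cases h : c = x <;> simp [carryPass, emit, h, ih]

lemma emit_len (l : List Int) (c : Int) : (emit c l).1.length = l.length := by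
  induction l generalizing c with
  | nil => simp [emit]
  | cons x xs ih => by_cases h : c = x <;> simp [emit, h, ih]

lemma emit_snoc (l : List Int) (c x : Int) :
    emit c (l ++ [x]) =
      if (emit c l).2 == x then ((emit c l).1 ++ [2 * (emit c l).2], 0)
      else ((emit c l).1 ++ [(emit c l).2], x) := by
  induction l generalizing c with
  | nil => simp [emit]
  | cons y ys ih =>
    by_cases h : c = y <;> simp [emit, h, ih] <;> split <;> simp

-- getD / set on an appended list, at offset k into the second part
lemma getD_append_off (E rest : List Int) (k : Nat) (d : Int) :
    (E ++ rest).getD (E.length + k) d = rest.getD k d := by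
  induction E with
  | nil => simp
  | cons e E ih => simpa [Nat.succ_add] using ih

lemma set_append_off (E rest : List Int) (k : Nat) (v : Int) :
    (E ++ rest).set (E.length + k) v = E ++ rest.set k v := by
  induction E with
  | nil => simp
  | cons e E ih => simpa [Nat.succ_add] using ih

lemma getD_append_len (E rest : List Int) (d : Int) :
    (E ++ rest).getD E.length d = rest.getD 0 d := by
  simpa using getD_append_off E rest 0 d

lemma set_append_len (E rest : List Int) (v : Int) :
    (E ++ rest).set E.length v = E ++ rest.set 0 v := by
  simpa using set_append_off E rest 0 v

-- step-1 loop invariant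
set_option maxRecDepth 4000 in
lemma step1_inv (h : Int) (t : List Int) :
    ∀ i, i ≤ t.length →
      (List.range i).foldl opStep (h :: t) =
        (emit h (t.take i)).1 ++ (emit h (t.take i)).2 :: t.drop i := by
  intro i
  induction i with
  | zero => intro _; simp [emit]
  | succ i ih =>
    intro hle
    have hi : i < t.length := by omega
    rw [List.range_succ, List.foldl_append, ih (by omega)]
    have hdrop : t.drop i = t[i] :: t.drop (i + 1) := List.drop_eq_getElem_cons hi
    have htake : t.take (i + 1) = t.take i ++ [t[i]] := by
      rw [List.take_add_one]; simp [List.getElem?_eq_getElem hi]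
    set E := (emit h (t.take i)).1 with hE
    set c := (emit h (t.take i)).2 with hc
    have hlen : E.length = i := by
      rw [hE, emit_len]; simp [Nat.min_eq_left (le_of_lt hi)]
    simp only [List.foldl_cons, List.foldl_nil, opStep]
    have g0 : (E ++ c :: t.drop i).getD i 0 = c := by
      have h0 := getD_append_len E (c :: t.drop i) 0
      rw [hlen] at h0
      rw [h0, List.getD_cons_zero]
    have g1 : (E ++ c :: t.drop i).getD (i + 1) 0 = t[i] := by
      have h1 := getD_append_off E (c :: t.drop i) 1 0
      rw [hlen] at h1
      rw [h1]
      simp only [List.getD_cons_succ, hdrop, List.getD_cons_zero]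
    rw [g0, g1, htake, emit_snoc, ← hE, ← hc]
    by_cases hcx : c = t[i]
    · have hb : (c == t[i]) = true := by simp [hcx]
      simp only [hb, if_true]
      have s0 : (E ++ c :: t.drop i).set i (2 * c) = E ++ (2 * c) :: t.drop i := by
        have s := set_append_len E (c :: t.drop i) (2 * c)
        rw [hlen] at s
        rw [s, List.set_cons_zero]
      rw [s0]
      have s1 : (E ++ (2 * c) :: t.drop i).set (i + 1) 0
          = E ++ (2 * c) :: (t.drop i).set 0 0 := by
        have s := set_append_off E ((2 * c) :: t.drop i) 1 0
        rw [hlen] at s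
        rw [s]
        simp
      rw [s1, hdrop]
      simp only [List.set_cons_zero, List.append_assoc, List.singleton_append]
    · have hb : (c == t[i]) = false := by simp [hcx]
      simp only [hb, Bool.false_eq_true, if_false]
      rw [hdrop]
      simp only [List.append_assoc, List.singleton_append]

-- after the whole step-1 loop the array is exactly B's carry pass
lemma step1_eq_carryPass (h : Int) (t : List Int) :
    (List.range t.length).foldl opStep (h :: t) = carryPass h t := by
  rw [step1_inv h t t.length le_rfl, carryPass_eq_emit]
  simp

-- moveZeroes loop invariant: after i steps the list is
--   (non-zeros of the first i) ++ zeros ++ untouched suffix, pos = number of non-zeros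
set_option maxRecDepth 4000 in
lemma mz_inv (l : List Int) :
    ∀ i, i ≤ l.length →
      (List.range i).foldl mzStep (l, 0) =
        (((l.take i).filter (fun v => v != 0))
            ++ List.replicate (i - ((l.take i).filter (fun v => v != 0)).length) 0
            ++ l.drop i,
          ((l.take i).filter (fun v => v != 0)).length) := by
  intro i
  induction i with
  | zero => intro _; simp
  | succ i ih =>
    intro hle
    have hi : i < l.length := by omega
    rw [List.range_succ, List.foldl_append, ih (by omega)]
    have hdrop : l.drop i = l[i] :: l.drop (i + 1) := List.drop_eq_getElem_cons hi
    have htake : l.take (i + 1) = l.take i ++ [l[i]] := by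
      rw [List.take_add_one]; simp [List.getElem?_eq_getElem hi]
    set nz := (l.take i).filter (fun v => v != 0) with hnz
    set p := nz.length with hp
    set rep := List.replicate (i - p) (0 : Int) with hrep
    have hple : p ≤ i := by
      have h1 := List.length_filter_le (fun v => v != 0) (l.take i)
      have h2 : (l.take i).length = i := by simp [Nat.min_eq_left (le_of_lt hi)]
      rw [hp, hnz]
      omega
    have hpre : (nz ++ rep).length = i := by
      rw [List.length_append, hrep, List.length_replicate, ← hp]
      omega
    simp only [List.foldl_cons, List.foldl_nil, mzStep]
    have gI : ((nz ++ rep ++ l.drop i)).getD i 0 = l[i] := by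
      have h1 := getD_append_len (nz ++ rep) (l.drop i) 0
      rw [hpre] at h1
      rw [h1, hdrop, List.getD_cons_zero]
    rw [htake]
    simp only [List.filter_append, List.filter_cons, List.filter_nil, ← hnz]
    by_cases hz : l[i] = 0
    · -- element is zero: state unchanged, the zero block just grows by one
      have hz2 : rep ++ (0 : Int) :: l.drop (i + 1)
          = List.replicate (i + 1 - p) 0 ++ l.drop (i + 1) := by
        rw [hrep, show i + 1 - p = (i - p) + 1 from by omega, List.replicate_succ']
        simp
      simp only [gI, hz, bne_self_eq_false, Bool.false_eq_true, if_false, List.append_nil]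
      rw [hdrop, hz, List.append_assoc, hz2, ← hp, ← List.append_assoc]
    · -- element non-zero: swap moves it to position p and a zero to position i
      have hb : (l[i] != 0) = true := by simp [hz]
      simp only [gI, hb, if_true]
      have sP : (nz ++ (rep ++ l.drop i)).set p l[i] = nz ++ (rep ++ l.drop i).set 0 l[i] := by
        have s := set_append_len nz (rep ++ l.drop i) l[i]
        rw [← hp] at s
        exact s
      by_cases hpi : p = i
      · -- pos caught up with i: both writes rewrite l[i] with itself
        have hr0 : rep = [] := by rw [hrep, hpi]; simp
        have gP : (nz ++ rep ++ l.drop i).getD p 0 = l[i] := by rw [hpi]; exact gI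
        rw [gP, List.append_assoc, sP, hr0, hdrop]
        simp only [List.nil_append, List.set_cons_zero]
        have sI : (nz ++ l[i] :: l.drop (i + 1)).set i l[i]
            = nz ++ l[i] :: l.drop (i + 1) := by
          have s := set_append_len nz (l[i] :: l.drop (i + 1)) l[i]
          rw [← hp, hpi] at s
          rw [s, List.set_cons_zero]
        rw [sI, show i + 1 - (nz ++ [l[i]]).length = 0 from by
          simp only [List.length_append, List.length_cons, List.length_nil, ← hp]; omega]
        simp only [List.replicate_zero, List.append_assoc, List.singleton_append,
          List.length_append, List.length_cons, List.length_nil, ← hp]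
      · -- p < i: position p holds a zero
        have hplt : p < i := by omega
        have gP : (nz ++ rep ++ l.drop i).getD p 0 = 0 := by
          have g := getD_append_len nz (rep ++ l.drop i) 0
          rw [← hp] at g
          rw [List.append_assoc, g, hrep]
          rw [show i - p = (i - p - 1) + 1 from by omega, List.replicate_succ]
          simp
        rw [gP, List.append_assoc, sP]
        have hr1 : rep = 0 :: List.replicate (i - p - 1) (0 : Int) := by
          rw [hrep]
          conv_lhs => rw [show i - p = (i - p - 1) + 1 from by omega]
          rw [List.replicate_succ]
        rw [hr1]
        simp only [List.cons_append, List.set_cons_zero]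
        have sI : (nz ++ l[i] :: (List.replicate (i - p - 1) (0 : Int) ++ l.drop i)).set i 0
            = nz ++ l[i] :: (List.replicate (i - p - 1) (0 : Int) ++ (l.drop i).set 0 0) := by
          have s := set_append_len (nz ++ l[i] :: List.replicate (i - p - 1) (0 : Int))
            (l.drop i)  0
          have hlen2 : (nz ++ l[i] :: List.replicate (i - p - 1) (0 : Int)).length = i := by
            simp only [List.length_append, List.length_cons, List.length_replicate, ← hp]
            omega
          rw [hlen2] at s
          simpa using s
        rw [sI, hdrop]
        simp only [List.set_cons_zero]
        have h3 : (nz ++ [l[i]]).length = p + 1 := by simp [hp]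
        rw [show i + 1 - (nz ++ [l[i]]).length = (i - p - 1) + 1 from by rw [h3]; omega,
            List.replicate_succ']
        refine Prod.ext ?_ h3.symm
        simp only [List.append_assoc, List.cons_append, List.nil_append]

theorem oparray_spec : Claim_equal_oparray := by
  intro nums _
  unfold Spec_oparray oparray oparray_alt moveZeroes
  cases nums with
  | nil => simp
  | cons h t =>
    have hstep : (List.range ((h :: t).length - 1)).foldl opStep (h :: t) = carryPass h t := by
      simpa using step1_eq_carryPass h t
    rw [hstep]
    rw [mz_inv (carryPass h t) (carryPass h t).length le_rfl]
    simp
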